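-- pv_equiv track=rewrite | github.com/pratyoyd/agentic-sql-pg | sql_adapter.py | _fix_round_calls
-- ===== SOURCE A (Python) =====
-- def _fix_round_calls(sql: str) -> str:
--     """Fix ROUND(expr, n) -> ROUND((expr)::numeric, n) using paren balancing."""
--     result = []
--     i = 0
--     upper = sql.upper()
--     while i < len(sql):
--         # Find ROUND(
--         idx = upper.find('ROUND(', i)
--         if idx == -1:
--             result.append(sql[i:])
--             break
--         # Check it's a word boundary
--         if idx > 0 and (upper[idx-1].isalnum() or upper[idx-1] == '_'):
--             result.append(sql[i:idx+6])
--             i = idx + 6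
--             continue
--         result.append(sql[i:idx])
--         # Find matching close paren
--         start = idx + 5  # position of '('
--         depth = 1
--         j = start + 1
--         while j < len(sql) and depth > 0:
--             if sql[j] == '(':
--                 depth += 1
--             elif sql[j] == ')':
--                 depth -= 1
--             j += 1
--         if depth != 0:
--             # Unbalanced — leave as-is
--             result.append(sql[idx:j])
--             i = j
--             continue
--         # inner is everything between ROUND( and the matching )
--         inner = sql[start+1:j-1]
--         # Find the last comma at depth 0 — that separates expr from precision
--         last_comma = -1
--         d = 0
--         for k, ch in enumerate(inner):
--             if ch == '(':
--                 d += 1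
--             elif ch == ')':
--                 d -= 1
--             elif ch == ',' and d == 0:
--                 last_comma = k
--         if last_comma == -1:
--             # No comma — ROUND(expr) with no precision, leave as-is
--             result.append(f"ROUND({inner})")
--         else:
--             expr = inner[:last_comma].strip()
--             prec = inner[last_comma+1:].strip()
--             if '::numeric' in expr:
--                 result.append(f"ROUND({expr}, {prec})")
--             else:
--                 result.append(f"ROUND(({expr})::numeric, {prec})")
--         i = j
--     return ''.join(result)
-- ===== SOURCE B (Python) =====
-- def _fix_round_calls(sql: str) -> str:
--     """Single forward scan with an explicit depth counter: on each top-level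
--     ROUND( token, one combined pass finds the matching ')' and the last
--     top-level comma at once, then emits the rewritten (or original) text."""
--     out = []
--     n = len(sql)
--     i = 0
--     while i < n:
--         if sql[i:i + 6].upper() == 'ROUND(':
--             if i > 0 and (sql[i - 1].isalnum() or sql[i - 1] == '_'):
--                 # inside a longer identifier: not a ROUND call, copy the token
--                 out.append(sql[i:i + 6])
--                 i += 6
--                 continue
--             # one combined pass: matching ')' and last comma at depth 1
--             depth = 1
--             close = None
--             last_comma = None
--             j = i + 6
--             while j < n:
--                 ch = sql[j]
--                 if ch == '(':
--                     depth += 1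
--                 elif ch == ')':
--                     if depth == 1:
--                         close = j
--                         break
--                     depth -= 1
--                 elif ch == ',' and depth == 1:
--                     last_comma = j
--                 j += 1
--             if close is None:
--                 # unbalanced: keep the tail verbatim
--                 out.append(sql[i:])
--                 break
--             if last_comma is None:
--                 out.append("ROUND(" + sql[i + 6:close] + ")")
--             else:
--                 expr = sql[i + 6:last_comma].strip()
--                 prec = sql[last_comma + 1:close].strip()
--                 if '::numeric' in expr:
--                     out.append("ROUND(" + expr + ", " + prec + ")")
--                 else:
--                     out.append("ROUND((" + expr + ")::numeric, " + prec + ")")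
--             i = close + 1
--         else:
--             out.append(sql[i])
--             i += 1
--     return ''.join(out)
-- ===== Notes on version B (the rewrite author's own statement) =====
-- stated objective: alternative
-- what changed: A uppercases the whole string, repeatedly calls str.find for the next ROUND token and then makes two separate passes per call site, a paren-balancing loop to find the matching close paren and a second enumerate loop over the inner text for the last top-level comma; B is a single forward character scan that recognizes the token in place and, per call site, runs one combined depth-counting pass finding the matching close paren and the last top-level comma simultaneously.
import Mathlib
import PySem

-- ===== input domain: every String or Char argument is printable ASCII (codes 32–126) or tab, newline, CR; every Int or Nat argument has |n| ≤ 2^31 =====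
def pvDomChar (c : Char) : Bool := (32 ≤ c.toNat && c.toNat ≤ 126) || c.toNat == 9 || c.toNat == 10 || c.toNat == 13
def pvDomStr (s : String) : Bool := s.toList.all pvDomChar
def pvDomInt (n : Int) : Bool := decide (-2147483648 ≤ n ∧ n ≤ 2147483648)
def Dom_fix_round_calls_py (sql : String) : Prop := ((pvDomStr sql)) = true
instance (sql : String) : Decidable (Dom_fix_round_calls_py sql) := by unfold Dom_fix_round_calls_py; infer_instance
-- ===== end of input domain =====

-- B replaces A's find-on-uppercased-copy plus two separate passes per call site (paren
-- balancing, then a last-comma scan over the inner text) by a single forward scan with a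
-- depth counter that finds the matching close paren and the last top-level comma in one
-- combined pass (objective: alternative).

-- ===== PORT A =====
-- 'ROUND(' (the needle A searches for in sql.upper())
def pvRound : List Char := ['R', 'O', 'U', 'N', 'D', '(']

-- A's inner while loop "while j < len(sql) and depth > 0": chars consumed and final depth
def pvBalA : List Char → Int → Nat × Int
  | [], d => (0, d)
  | c :: cs, d =>
    if 0 < d then
      let r := pvBalA cs (if c = '(' then d + 1 else if c = ')' then d - 1 else d)
      (r.1 + 1, r.2)
    else (0, d)

-- A's "for k, ch in enumerate(inner)" last-top-level-comma loop (last_comma = -1 sentinel)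
def pvCommaA : List Char → Int → Int → Int → Int
  | [], _, _, last => last
  | c :: cs, d, k, last =>
    if c = '(' then pvCommaA cs (d + 1) (k + 1) last
    else if c = ')' then pvCommaA cs (d - 1) (k + 1) last
    else if c = ',' ∧ d = 0 then pvCommaA cs d (k + 1) k
    else pvCommaA cs d (k + 1) last

-- needed by pvLoopA's termination proof (the port cites it in decreasing_by)
theorem pvFindNeNil (s : List Char)
    (h : ¬ PySem.Chars.find (PySem.Chars.upper s) pvRound < 0) : 0 < s.length := by
  rcases s with _ | ⟨c, cs⟩
  · exact absurd (by decide : PySem.Chars.find (PySem.Chars.upper ([] : List Char)) pvRound < 0) h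
  · simp

-- A's outer while loop, phrased on the remaining suffix; prev = sql[i-1] (None at i=0);
-- sql.upper() is recomputed per suffix (upper is per-character, so this is the same value A reads)
def pvLoopA (prev : Option Char) (s : List Char) : List Char :=
  let u := PySem.Chars.upper s
  let f := PySem.Chars.find u pvRound
  if hf : f < 0 then s                                        -- idx == -1: append rest, break
  else
    let idx := f.toNat
    let pre := s.take idx                                     -- sql[i:idx]
    let rest := s.drop idx                                    -- sql[idx:]
    let bnd : Option Char := if 0 < idx then u[idx - 1]? else prev.map PySem.Chars.upperChar
    if bnd.any (fun ch => PySem.Chars.isalnum ch || ch == '_') then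
      -- word-boundary failure: append sql[i:idx+6], i = idx+6
      pre ++ rest.take 6 ++ pvLoopA rest[5]? (rest.drop 6)
    else
      let body := rest.drop 6                                 -- sql[start+1:]
      let r := pvBalA body 1
      if r.2 ≠ 0 then
        -- unbalanced: append sql[idx:j], i = j   (j = idx+6+r.1)
        pre ++ rest.take (6 + r.1) ++ pvLoopA rest[6 + r.1 - 1]? (rest.drop (6 + r.1))
      else
        let inner := body.take (r.1 - 1)                      -- sql[start+1:j-1]
        let lastComma := pvCommaA inner 0 0 (-1)
        let piece :=
          if lastComma = -1 then "ROUND(".toList ++ inner ++ ")".toList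
          else
            let expr := PySem.Chars.strip (inner.take lastComma.toNat)      -- inner[:last_comma]
            let prec := PySem.Chars.strip (inner.drop (lastComma.toNat + 1)) -- inner[last_comma+1:]
            if PySem.Chars.isIn "::numeric".toList expr then
              "ROUND(".toList ++ expr ++ ", ".toList ++ prec ++ ")".toList
            else
              "ROUND((".toList ++ expr ++ ")::numeric, ".toList ++ prec ++ ")".toList
        pre ++ piece ++ pvLoopA rest[6 + r.1 - 1]? (rest.drop (6 + r.1))
termination_by s.length
decreasing_by
  · have := pvFindNeNil s hf; simp; omega
  · have := pvFindNeNil s hf; simp; omega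
  · have := pvFindNeNil s hf; simp; omega

def fix_round_calls_py (sql : String) : String := String.ofList (pvLoopA none sql.toList)

-- ===== PORT B =====
-- B's combined inner scan: matching ')' position and last depth-1 comma, in one pass
def pvScanB : List Char → Int → Nat → Option Nat → Option (Nat × Option Nat)
  | [], _, _, _ => none
  | c :: cs, depth, j, last =>
    if c = '(' then pvScanB cs (depth + 1) (j + 1) last
    else if c = ')' then
      if depth = 1 then some (j, last) else pvScanB cs (depth - 1) (j + 1) last
    else if c = ',' ∧ depth = 1 then pvScanB cs depth (j + 1) (some j)
    else pvScanB cs depth (j + 1) last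

-- B's single forward scan; prev = sql[i-1] (None at i=0)
def pvLoopB (prev : Option Char) (s : List Char) : List Char :=
  match s with
  | [] => []
  | c :: cs =>
    if PySem.Chars.upper ((c :: cs).take 6) = pvRound then
      if prev.any (fun p => PySem.Chars.isalnum p || p == '_') then
        -- inside a longer identifier: copy the token, i += 6
        (c :: cs).take 6 ++ pvLoopB (c :: cs)[5]? ((c :: cs).drop 6)
      else
        let body := (c :: cs).drop 6
        match pvScanB body 1 0 none with
        | none => c :: cs                                     -- unbalanced: keep the tail verbatim
        | some (close, lc) =>
          let piece :=
            match lc with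
            | none => "ROUND(".toList ++ body.take close ++ ")".toList
            | some m =>
              let expr := PySem.Chars.strip (body.take m)
              let prec := PySem.Chars.strip ((body.drop (m + 1)).take (close - (m + 1)))
              if PySem.Chars.isIn "::numeric".toList expr then
                "ROUND(".toList ++ expr ++ ", ".toList ++ prec ++ ")".toList
              else
                "ROUND((".toList ++ expr ++ ")::numeric, ".toList ++ prec ++ ")".toList
          piece ++ pvLoopB body[close]? (body.drop (close + 1))
    else c :: pvLoopB (some c) cs
termination_by s.length
decreasing_by
  all_goals simp

def fix_round_calls_py_alt (sql : String) : String := String.ofList (pvLoopB none sql.toList)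

-- ===== PRECONDITION & SPEC =====
def Spec_fix_round_calls_py (sql : String) (out : String) : Prop := out = fix_round_calls_py_alt sql
instance (sql : String) (out : String) : Decidable (Spec_fix_round_calls_py sql out) := by unfold Spec_fix_round_calls_py; infer_instance

-- ===== CLAIM (what is proved, stated in full; the proofs are below) =====
def Claim_equal_fix_round_calls_py : Prop := ∀ (sql : String), Dom_fix_round_calls_py sql → Spec_fix_round_calls_py sql (fix_round_calls_py sql)

-- ===== LEMMAS AND PROOFS =====

theorem pv_char_le (a b : Char) : (a ≤ b) ↔ (a.toNat ≤ b.toNat) := Char.le_def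

theorem pvCharVals : 'A'.toNat = 65 ∧ 'Z'.toNat = 90 ∧ 'a'.toNat = 97 ∧ 'z'.toNat = 122 ∧ '0'.toNat = 48 ∧ '9'.toNat = 57 ∧ '_'.toNat = 95 := by decide

theorem pvBndChar (c : Char) :
    (PySem.Chars.isalnum (PySem.Chars.upperChar c) || (PySem.Chars.upperChar c == '_'))
      = (PySem.Chars.isalnum c || (c == '_')) := by
  by_cases hl : PySem.Chars.islower c = true
  · have hb : 97 ≤ c.toNat ∧ c.toNat ≤ 122 := by
      simp only [PySem.Chars.islower, Bool.and_eq_true, decide_eq_true_eq, pv_char_le] at hl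
      exact hl
    have hu : PySem.Chars.upperChar c = Char.ofNat (c.toNat - 32) := by
      simp [PySem.Chars.upperChar, hl]
    have hv : (Char.ofNat (c.toNat - 32)).toNat = c.toNat - 32 := by
      rw [Char.toNat_ofNat, if_pos]; unfold Nat.isValidChar; omega
    have hL : PySem.Chars.isalnum (PySem.Chars.upperChar c) = true := by
      simp only [hu, PySem.Chars.isalnum, PySem.Chars.isalpha, PySem.Chars.isupper,
        Bool.or_eq_true, Bool.and_eq_true, decide_eq_true_eq, pv_char_le, hv]
      obtain ⟨v1,v2,v3,v4,v5,v6,v7⟩ := pvCharVals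
      left; left; omega
    have hR : PySem.Chars.isalnum c = true := by
      simp only [PySem.Chars.isalnum, PySem.Chars.isalpha, PySem.Chars.islower,
        Bool.or_eq_true, Bool.and_eq_true, decide_eq_true_eq, pv_char_le]
      obtain ⟨v1,v2,v3,v4,v5,v6,v7⟩ := pvCharVals
      left; right; omega
    simp [hL, hR]
  · have : PySem.Chars.upperChar c = c := by simp [PySem.Chars.upperChar, hl]
    rw [this]

theorem pvBndOpt (p : Option Char) :
    (p.map PySem.Chars.upperChar).any (fun ch => PySem.Chars.isalnum ch || ch == '_')
      = p.any (fun ch => PySem.Chars.isalnum ch || ch == '_') := by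
  cases p with
  | none => rfl
  | some c => simp only [Option.map_some, Option.any_some]; exact pvBndChar c

theorem pvFindEq (xs sub : List Char) (n : Nat) :
    PySem.Chars.find xs sub = (n : Int) ↔
      (sub <+: xs.drop n ∧ ∀ i < n, ¬ sub <+: xs.drop i) := by
  constructor
  · intro h
    have h0 : 0 ≤ PySem.Chars.find xs sub := by rw [h]; positivity
    have hs := PySem.Chars.find_spec h0
    rw [h] at hs
    simpa using hs
  · rintro ⟨h1, h2⟩
    have hinf : sub <:+: xs := by
      exact (h1.isInfix).trans (xs.drop_suffix n).isInfix
    have h0 : 0 ≤ PySem.Chars.find xs sub := (PySem.Chars.find_nonneg_iff xs sub).mpr hinf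
    have hs := PySem.Chars.find_spec h0
    have ht : (PySem.Chars.find xs sub).toNat = n := by
      rcases Nat.lt_trichotomy (PySem.Chars.find xs sub).toNat n with h | h | h
      · exact absurd hs.1 (h2 _ h)
      · exact h
      · exact absurd h1 (hs.2 n h)
    omega

def pvEnc : Option Nat → Int
  | none => -1
  | some m => (m : Int)

theorem pvBalA_zero (cs : List Char) : pvBalA cs 0 = (0, 0) := by
  cases cs <;> simp [pvBalA]

theorem pvComb (cs : List Char) : ∀ (d : Int), 1 ≤ d → ∀ (j0 : Nat) (l0 : Option Nat),
    (∀ m, l0 = some m → m < j0) →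
    (pvScanB cs d j0 l0 = none → (pvBalA cs d).2 ≠ 0 ∧ (pvBalA cs d).1 = cs.length)
    ∧ (∀ close lc, pvScanB cs d j0 l0 = some (close, lc) →
        j0 ≤ close ∧ close - j0 < cs.length ∧ pvBalA cs d = (close - j0 + 1, 0)
        ∧ pvCommaA (cs.take (close - j0)) (d - 1) (j0 : Int) (pvEnc l0) = pvEnc lc
        ∧ ∀ m, lc = some m → m < close) := by
  induction cs with
  | nil =>
    intro d hd j0 l0 hl0
    refine ⟨fun _ => ?_, fun close lc h => by simp [pvScanB] at h⟩
    simp [pvBalA]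
    omega
  | cons c cs ih =>
    intro d hd j0 l0 hl0
    by_cases hp : c = '('
    · -- depth increases
      have hrec := ih (d + 1) (by omega) (j0 + 1) l0 (fun m hm => by have := hl0 m hm; omega)
      constructor
      · intro h
        rw [pvScanB, if_pos hp] at h
        have := hrec.1 h
        rw [pvBalA, if_pos (by omega : (0:Int) < d), if_pos hp]
        simpa using this
      · intro close lc h
        rw [pvScanB, if_pos hp] at h
        obtain ⟨hle, hlt, hbal, hcom, hlc⟩ := hrec.2 close lc h
        have hcl : close - j0 = (close - (j0 + 1)) + 1 := by omega
        refine ⟨by omega, by simp; omega, ?_, ?_, hlc⟩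
        · rw [pvBalA, if_pos (by omega : (0:Int) < d), if_pos hp, hbal, hcl]
        · rw [hcl, List.take_succ_cons, pvCommaA, if_pos hp]
          have : (d + 1 : Int) - 1 = (d - 1) + 1 := by omega
          rw [← this]
          convert hcom using 2
    · by_cases hq : c = ')'
      · by_cases h1 : d = 1
        · -- close found here
          constructor
          · intro h
            rw [pvScanB, if_neg hp, if_pos hq, if_pos h1] at h
            simp at h
          · intro close lc h
            rw [pvScanB, if_neg hp, if_pos hq, if_pos h1] at h
            obtain ⟨rfl, rfl⟩ : close = j0 ∧ lc = l0 := by simpa [Prod.ext_iff, eq_comm] using h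
            refine ⟨le_refl _, by simp, ?_, by simp [pvCommaA], hl0⟩
            rw [pvBalA, if_pos (by omega : (0:Int) < d), if_neg hp, if_pos hq, h1]
            simp [pvBalA_zero]
        · -- depth decreases, still ≥ 1
          have hrec := ih (d - 1) (by omega) (j0 + 1) l0 (fun m hm => by have := hl0 m hm; omega)
          constructor
          · intro h
            rw [pvScanB, if_neg hp, if_pos hq, if_neg h1] at h
            have := hrec.1 h
            rw [pvBalA, if_pos (by omega : (0:Int) < d), if_neg hp, if_pos hq]
            simpa using this
          · intro close lc h
            rw [pvScanB, if_neg hp, if_pos hq, if_neg h1] at h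
            obtain ⟨hle, hlt, hbal, hcom, hlc⟩ := hrec.2 close lc h
            have hcl : close - j0 = (close - (j0 + 1)) + 1 := by omega
            refine ⟨by omega, by simp; omega, ?_, ?_, hlc⟩
            · rw [pvBalA, if_pos (by omega : (0:Int) < d), if_neg hp, if_pos hq, hbal, hcl]
            · rw [hcl, List.take_succ_cons, pvCommaA, if_neg hp, if_pos hq]
              convert hcom using 2
      · by_cases hc : c = ',' ∧ d = 1
        · -- comma recorded
          have hrec := ih d hd (j0 + 1) (some j0) (fun m hm => by cases hm; omega)
          constructor
          · intro h
            rw [pvScanB, if_neg hp, if_neg hq, if_pos hc] at h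
            have := hrec.1 h
            rw [pvBalA, if_pos (by omega : (0:Int) < d), if_neg hp, if_neg hq]
            simpa using this
          · intro close lc h
            rw [pvScanB, if_neg hp, if_neg hq, if_pos hc] at h
            obtain ⟨hle, hlt, hbal, hcom, hlc⟩ := hrec.2 close lc h
            have hcl : close - j0 = (close - (j0 + 1)) + 1 := by omega
            refine ⟨by omega, by simp; omega, ?_, ?_, hlc⟩
            · rw [pvBalA, if_pos (by omega : (0:Int) < d), if_neg hp, if_neg hq, hbal, hcl]
            · rw [hcl, List.take_succ_cons, pvCommaA, if_neg hp, if_neg hq,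
                if_pos (⟨hc.1, by omega⟩ : c = ',' ∧ d - 1 = 0)]
              convert hcom using 2
        · -- plain char
          have hrec := ih d hd (j0 + 1) l0 (fun m hm => by have := hl0 m hm; omega)
          constructor
          · intro h
            rw [pvScanB, if_neg hp, if_neg hq, if_neg hc] at h
            have := hrec.1 h
            rw [pvBalA, if_pos (by omega : (0:Int) < d), if_neg hp, if_neg hq]
            simpa using this
          · intro close lc h
            rw [pvScanB, if_neg hp, if_neg hq, if_neg hc] at h
            obtain ⟨hle, hlt, hbal, hcom, hlc⟩ := hrec.2 close lc h
            have hcl : close - j0 = (close - (j0 + 1)) + 1 := by omega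
            refine ⟨by omega, by simp; omega, ?_, ?_, hlc⟩
            · rw [pvBalA, if_pos (by omega : (0:Int) < d), if_neg hp, if_neg hq, hbal, hcl]
            · rw [hcl, List.take_succ_cons, pvCommaA, if_neg hp, if_neg hq,
                if_neg (by intro hx; exact hc ⟨hx.1, by omega⟩ : ¬(c = ',' ∧ d - 1 = 0))]
              convert hcom using 2

theorem pvRound_len : pvRound.length = 6 := by decide

theorem pvTokIff (s : List Char) :
    PySem.Chars.upper (s.take 6) = pvRound ↔ pvRound <+: PySem.Chars.upper s := by
  rw [List.prefix_iff_eq_take, pvRound_len, PySem.Chars.upper, PySem.Chars.upper, List.map_take, eq_comm]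

theorem pvLoopB_nomatch (s : List Char) (hnm : ¬ pvRound <:+: PySem.Chars.upper s) :
    ∀ prev, pvLoopB prev s = s := by
  induction s with
  | nil => intro prev; rw [pvLoopB.eq_def]
  | cons c cs ih =>
    intro prev
    have htok : ¬ PySem.Chars.upper ((c :: cs).take 6) = pvRound := by
      intro h
      exact hnm ((pvTokIff _).mp h).isInfix
    rw [pvLoopB.eq_def]
    simp only [if_neg htok]
    congr 1
    apply ih
    intro h
    apply hnm
    simp only [PySem.Chars.upper, List.map_cons]
    obtain ⟨u, v, huv⟩ := h
    exact ⟨PySem.Chars.upperChar c :: u, v, by have := huv; simp only [PySem.Chars.upper] at this; simp [this]⟩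

theorem pvLoopA_cons (c : Char) (cs : List Char) (n : Nat)
    (hf : PySem.Chars.find (PySem.Chars.upper (c :: cs)) pvRound = ((n + 1 : Nat) : Int))
    (prev : Option Char) :
    pvLoopA prev (c :: cs) = c :: pvLoopA (some c) cs := by
  have hspec := (pvFindEq _ _ (n + 1)).mp hf
  have hf2 : PySem.Chars.find (PySem.Chars.upper cs) pvRound = (n : Int) := by
    rw [pvFindEq]
    constructor
    · have h1 := hspec.1
      simpa [PySem.Chars.upper] using h1
    · intro i hi hpre
      exact hspec.2 (i + 1) (by omega) (by simpa [PySem.Chars.upper] using hpre)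
  rw [pvLoopA.eq_def, pvLoopA.eq_def]
  simp only [hf, hf2]
  rw [dif_neg (by omega : ¬(((n + 1 : Nat) : Int) < 0)), dif_neg (by omega : ¬((n : Nat) : Int) < 0)]
  simp only [Int.toNat_natCast, List.drop_succ_cons, List.take_succ_cons, List.cons_append,
    List.append_assoc]
  cases n with
  | zero =>
    simp only [PySem.Chars.upper, List.map_cons, List.getElem?_cons_zero, Nat.lt_irrefl,
      if_pos (Nat.succ_pos 0), Nat.add_sub_cancel, if_false, Option.map_some]
    simp
    split_ifs <;> rfl
  | succ k =>
    simp [PySem.Chars.upper, Nat.add_comm, Nat.add_left_comm, Nat.add_assoc]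
    split_ifs <;> rfl

theorem pvLoopA_nil (prev : Option Char) : pvLoopA prev [] = [] := by
  rw [pvLoopA.eq_def]
  simp [show PySem.Chars.find (PySem.Chars.upper ([] : List Char)) pvRound = -1 from by decide]

theorem pv_loop_eq_aux : ∀ (N : Nat) (s : List Char), s.length ≤ N →
    ∀ (prev : Option Char), pvLoopA prev s = pvLoopB prev s := by
  intro N
  induction N with
  | zero =>
    intro s hlen prev
    have : s = [] := by cases s <;> simp_all
    subst this
    rw [pvLoopA_nil, pvLoopB.eq_def]
  | succ N ih =>
    intro s hlen prev
    rcases s with _ | ⟨c, cs⟩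
    · rw [pvLoopA_nil, pvLoopB.eq_def]
    have hcs : cs.length ≤ N := by simpa using hlen
    have hge := PySem.Chars.neg_one_le_find (PySem.Chars.upper (c :: cs)) pvRound
    rcases lt_or_ge (PySem.Chars.find (PySem.Chars.upper (c :: cs)) pvRound) 0 with hneg | hpos
    · -- no occurrence at all
      have hm1 : PySem.Chars.find (PySem.Chars.upper (c :: cs)) pvRound = -1 := by omega
      have hni : ¬ pvRound <:+: PySem.Chars.upper (c :: cs) :=
        (PySem.Chars.find_eq_neg_one_iff _ _).mp hm1
      have hA : pvLoopA prev (c :: cs) = c :: cs := by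
        rw [pvLoopA.eq_def]; simp [hm1]
      rw [hA, pvLoopB_nomatch _ hni]
    · obtain ⟨m, hm⟩ : ∃ m : Nat, PySem.Chars.find (PySem.Chars.upper (c :: cs)) pvRound = (m : Int) :=
        ⟨(PySem.Chars.find (PySem.Chars.upper (c :: cs)) pvRound).toNat, by omega⟩
      cases m with
      | succ k =>
        -- first occurrence strictly inside: peel one char off both loops
        rw [pvLoopA_cons c cs k (by exact_mod_cast hm)]
        have htok : ¬ PySem.Chars.upper ((c :: cs).take 6) = pvRound := by
          intro h
          exact ((pvFindEq _ pvRound (k + 1)).mp (by exact_mod_cast hm)).2 0 (by omega)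
            (by simpa using (pvTokIff _).mp h)
        rw [pvLoopB.eq_def]
        simp only [if_neg htok]
        congr 1
        exact ih cs hcs (some c)
      | zero =>
        -- 'ROUND(' at the head of the suffix
        have hspec := (pvFindEq _ pvRound 0).mp (by exact_mod_cast hm)
        have htok : PySem.Chars.upper ((c :: cs).take 6) = pvRound :=
          (pvTokIff _).mpr (by simpa using hspec.1)
        have hm0 : PySem.Chars.find (PySem.Chars.upper (c :: cs)) pvRound = 0 := by exact_mod_cast hm
        rw [pvLoopA.eq_def, pvLoopB.eq_def]
        simp only [hm0, if_pos htok]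
        rw [dif_neg (lt_irrefl (0 : Int))]
        simp only [Int.toNat_zero, List.take_zero, List.drop_zero, List.nil_append,
          lt_irrefl, if_false, pvBndOpt]
        by_cases hbc : (prev.any fun p => PySem.Chars.isalnum p || p == '_') = true
        · rw [if_pos hbc, if_pos hbc]
          congr 1
          exact ih _ (by simp at hlen ⊢; omega) _
        · rw [if_neg hbc, if_neg hbc]
          have hcomb := pvComb ((c :: cs).drop 6) 1 (le_refl 1) 0 none (by simp)
          rcases hscan : pvScanB ((c :: cs).drop 6) 1 0 none with _ | ⟨close, lc⟩
          · -- unbalanced: everything to the end is copied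
            obtain ⟨hne, hall⟩ := hcomb.1 hscan
            rw [if_pos hne, hall]
            have hdrop : (c :: cs).drop (6 + ((c :: cs).drop 6).length) = [] := by
              simp
              omega
            have htake : (c :: cs).take (6 + ((c :: cs).drop 6).length) = c :: cs := by
              apply List.take_of_length_le
              simp
              omega
            rw [hdrop, htake, pvLoopA_nil, List.append_nil]
          · obtain ⟨-, hlt, hbal, hcom, hlc⟩ := hcomb.2 close lc hscan
            have hcom' : pvCommaA (List.take close (List.drop 6 (c :: cs))) 0 0 (-1) = pvEnc lc := by
              simpa [pvEnc] using hcom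
            rw [if_neg (by rw [hbal]; simp), hbal]
            simp only [Nat.add_sub_cancel, Nat.sub_zero]
            have harith : 6 + (close + 1) - 1 = 6 + close := by omega
            have hidx : ((c :: cs).drop 6)[close]? = (c :: cs)[6 + close]? := by
              rw [List.getElem?_drop]
            have hdrop2 : ((c :: cs).drop 6).drop (close + 1) = (c :: cs).drop (6 + (close + 1)) := by
              rw [List.drop_drop]
            have hrec : pvLoopA (c :: cs)[6 + close]? ((c :: cs).drop (6 + (close + 1)))
                = pvLoopB (c :: cs)[6 + close]? ((c :: cs).drop (6 + (close + 1))) := by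
              apply ih
              simp at hlt ⊢
              omega
            cases lc with
            | none =>
              simp only [pvEnc] at hcom'
              rw [if_pos hcom', harith, hidx, hdrop2, hrec]
            | some m =>
              simp only [pvEnc] at hcom'
              rw [if_neg (by rw [hcom']; omega), hcom']
              simp only [Int.toNat_natCast]
              have hm' : m < close := hlc m rfl
              have hexpr : (((c :: cs).drop 6).take close).take m = ((c :: cs).drop 6).take m := by
                rw [List.take_take]
                congr 1
                omega
              have hprec : (((c :: cs).drop 6).take close).drop (m + 1)
                  = (((c :: cs).drop 6).drop (m + 1)).take (close - (m + 1)) := by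
                rw [List.drop_take]
              rw [hexpr, hprec, harith, hidx, hdrop2, hrec]

theorem pv_loop_eq (s : List Char) (prev : Option Char) : pvLoopA prev s = pvLoopB prev s :=
  pv_loop_eq_aux s.length s (le_refl _) prev

-- ===== VERDICT (by name: the statement is the Claim_ definition above) =====
theorem fix_round_calls_py_spec : Claim_equal_fix_round_calls_py := by
  intro sql _
  unfold Spec_fix_round_calls_py fix_round_calls_py fix_round_calls_py_alt
  rw [pv_loop_eq]
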